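-- pv_equiv track=rewrite | github.com/Magenta195/Algorithm | 프로그래머스/3/258707. n ＋ 1 카드게임/n ＋ 1 카드게임.py | solution
-- ===== SOURCE A (Python) =====
-- def solution(coin, cards):
--     answer = 0
--     hand = set()
--     left = set()
--
--     left_matched = 0
--     half_matched = 0
--     matched = 0
--     N = len(cards)
--
--     for card in cards[:N//3] :
--         if N+1-card in hand :
--             matched += 1
--             hand.discard(N+1-card)
--         else :
--             hand.add(card)
--
--     round = 1
--     for i in range(N//3, N, 2) :
--         for card in cards[i:i+2] :
--             if N+1-card in hand :
--                 half_matched += 1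
--                 hand.discard(N+1-card)
--             elif N+1-card in left :
--                 left_matched += 1
--                 left.discard(N+1-card)
--             else :
--                 left.add(card)
--
--         if matched :
--             matched -= 1
--         elif coin > 0 and half_matched :
--             half_matched -= 1
--             coin -= 1
--         elif coin > 1 and left_matched :
--             left_matched -= 1
--             coin -= 2
--         else :
--             break
--         round += 1
--
--     return round
-- ===== SOURCE B (Python) =====
-- def solution(coin, cards):
--     # Two-pass decomposition: one discovery pass records per-round new matches,
--     # a separate consumption loop spends matched pairs / coins greedily.
--     N = len(cards)
--     hand = set()
--     matched = 0
--     for card in cards[:N//3]: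
--         if N+1-card in hand:
--             matched += 1
--             hand.discard(N+1-card)
--         else:
--             hand.add(card)
--     # discovery: how many new half-matches / left-matches appear in each round
--     left = set()
--     rounds = []
--     for i in range(N//3, N, 2):
--         dh = 0
--         dl = 0
--         for card in cards[i:i+2]:
--             if N+1-card in hand:
--                 dh += 1
--                 hand.discard(N+1-card)
--             elif N+1-card in left:
--                 dl += 1
--                 left.discard(N+1-card)
--             else:
--                 left.add(card)
--         rounds.append((dh, dl))
--     # consumption: greedy spending over the precomputed per-round increments
--     half = 0
--     leftm = 0
--     round = 1
--     for dh, dl in rounds: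
--         half += dh
--         leftm += dl
--         if matched:
--             matched -= 1
--         elif coin > 0 and half:
--             half -= 1
--             coin -= 1
--         elif coin > 1 and leftm:
--             leftm -= 1
--             coin -= 2
--         else:
--             break
--         round += 1
--     return round
-- ===== Notes on version B (the rewrite author's own statement) =====
-- stated objective: alternative
-- what changed: A interleaves discovery and spending in one break-loop; B splits them into a discovery pass that precomputes per-round half/left match increments and a separate greedy consumption loop over that list.
import Mathlib
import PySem

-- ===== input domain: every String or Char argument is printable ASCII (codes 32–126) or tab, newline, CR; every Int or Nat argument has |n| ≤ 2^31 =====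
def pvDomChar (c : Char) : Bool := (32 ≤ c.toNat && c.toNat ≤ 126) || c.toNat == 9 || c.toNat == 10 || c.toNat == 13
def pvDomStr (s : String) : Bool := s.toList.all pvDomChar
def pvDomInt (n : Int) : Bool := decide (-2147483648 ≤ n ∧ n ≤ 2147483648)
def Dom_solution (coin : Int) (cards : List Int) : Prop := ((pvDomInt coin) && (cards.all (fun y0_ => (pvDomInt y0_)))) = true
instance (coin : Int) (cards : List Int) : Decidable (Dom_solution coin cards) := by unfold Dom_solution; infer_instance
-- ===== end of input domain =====

-- B re-decomposes A's single break-loop into a discovery pass (per-round match increments)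
-- plus a separate greedy consumption loop; same cost, objective: alternative decomposition.

-- ===== PORT A =====
-- per-card processing of A's inner `for card in cards[i:i+2]` body (identical lines in B's discovery pass)
def pvCard (N : Int) (s : PySem.Set Int × PySem.Set Int × Int × Int) (card : Int) :
    PySem.Set Int × PySem.Set Int × Int × Int :=
  match s with
  | (hand, left, h, l) =>
    if PySem.Set.contains hand (N + 1 - card) then
      (PySem.Set.discard hand (N + 1 - card), left, h + 1, l)
    else if PySem.Set.contains left (N + 1 - card) then
      (hand, PySem.Set.discard left (N + 1 - card), h, l + 1)
    else
      (hand, PySem.Set.add left card, h, l)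

-- body of the first loop `for card in cards[:N//3]` (identical lines in both Pythons)
def pvDraw (N : Int) (s : PySem.Set Int × Int) (card : Int) : PySem.Set Int × Int :=
  match s with
  | (hand, m) =>
    if PySem.Set.contains hand (N + 1 - card) then (PySem.Set.discard hand (N + 1 - card), m + 1)
    else (PySem.Set.add hand card, m)

-- A's round loop `for i in range(N//3, N, 2)` with its break, carried state as in A
def pvLoopA (N : Int) (cards : List Int) :
    List Int → PySem.Set Int × PySem.Set Int × Int × Int × Int × Int × Int → Int
  | [], (_, _, _, _, _, _, round) => round
  | i :: is, (hand, left, matched, half, lm, coin, round) =>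
    match (PySem.List.slice cards (some i) (some (i + 2))).foldl (pvCard N) (hand, left, half, lm) with
    | (hand', left', half', lm') =>
      if matched ≠ 0 then
        pvLoopA N cards is (hand', left', matched - 1, half', lm', coin, round + 1)
      else if coin > 0 ∧ half' ≠ 0 then
        pvLoopA N cards is (hand', left', matched, half' - 1, lm', coin - 1, round + 1)
      else if coin > 1 ∧ lm' ≠ 0 then
        pvLoopA N cards is (hand', left', matched, half', lm' - 1, coin - 2, round + 1)
      else round

def solution (coin : Int) (cards : List Int) : Int :=
  let N : Int := cards.length
  match (PySem.List.slice cards none (some (PySem.Int.floordiv N 3))).foldl (pvDraw N)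
      (PySem.Set.empty, 0) with
  | (hand, matched) =>
    pvLoopA N cards (PySem.List.pyRange (PySem.Int.floordiv N 3) N 2)
      (hand, PySem.Set.empty, matched, 0, 0, coin, 1)

-- ===== PORT B =====
-- discovery pass: per-round (new half-matches, new left-matches), counts restarted at 0 each round
def pvDiscover (N : Int) (cards : List Int) :
    List Int → PySem.Set Int × PySem.Set Int → List (Int × Int)
  | [], _ => []
  | i :: is, (hand, left) =>
    match (PySem.List.slice cards (some i) (some (i + 2))).foldl (pvCard N) (hand, left, 0, 0) with
    | (hand', left', dh, dl) => (dh, dl) :: pvDiscover N cards is (hand', left')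

-- consumption loop: accumulate the increments, spend free/coin-1/coin-2 matches greedily
def pvConsume : List (Int × Int) → Int → Int → Int → Int → Int → Int
  | [], _, _, _, _, round => round
  | (dh, dl) :: rs, matched, half, lm, coin, round =>
    let half' := half + dh
    let lm' := lm + dl
    if matched ≠ 0 then pvConsume rs (matched - 1) half' lm' coin (round + 1)
    else if coin > 0 ∧ half' ≠ 0 then pvConsume rs matched (half' - 1) lm' (coin - 1) (round + 1)
    else if coin > 1 ∧ lm' ≠ 0 then pvConsume rs matched half' (lm' - 1) (coin - 2) (round + 1)
    else round

def solution_alt (coin : Int) (cards : List Int) : Int :=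
  let N : Int := cards.length
  match (PySem.List.slice cards none (some (PySem.Int.floordiv N 3))).foldl (pvDraw N)
      (PySem.Set.empty, 0) with
  | (hand, matched) =>
    pvConsume (pvDiscover N cards (PySem.List.pyRange (PySem.Int.floordiv N 3) N 2)
      (hand, PySem.Set.empty)) matched 0 0 coin 1

-- ===== PRECONDITION & SPEC =====
def Spec_solution (coin : Int) (cards : List Int) (out : Int) : Prop := out = solution_alt coin cards
instance (coin : Int) (cards : List Int) (out : Int) : Decidable (Spec_solution coin cards out) := by unfold Spec_solution; infer_instance

-- ===== CLAIM (what is proved, stated in full; the proofs are below) =====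
def Claim_equal_solution : Prop := ∀ (coin : Int) (cards : List Int), Dom_solution coin cards → Spec_solution coin cards (solution coin cards)

-- ===== LEMMAS AND PROOFS =====

-- the card fold only ADDS to the two counters, and the set components ignore them
theorem pvCard_foldl_offset (N : Int) : ∀ (cs : List Int) (hand left : PySem.Set Int) (a b : Int),
    cs.foldl (pvCard N) (hand, left, a, b) =
      ( (cs.foldl (pvCard N) (hand, left, 0, 0)).1,
        (cs.foldl (pvCard N) (hand, left, 0, 0)).2.1,
        a + (cs.foldl (pvCard N) (hand, left, 0, 0)).2.2.1,
        b + (cs.foldl (pvCard N) (hand, left, 0, 0)).2.2.2 )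
  | [], hand, left, a, b => by simp
  | c :: cs, hand, left, a, b => by
    simp only [List.foldl_cons, pvCard]
    split_ifs with h1 h2
    · rw [pvCard_foldl_offset N cs _ _ (a + 1) b, pvCard_foldl_offset N cs _ _ (0 + 1) 0]
      refine Prod.ext rfl (Prod.ext rfl (Prod.ext ?_ ?_)) <;> simp <;> ring
    · rw [pvCard_foldl_offset N cs _ _ a (b + 1), pvCard_foldl_offset N cs _ _ 0 (0 + 1)]
      refine Prod.ext rfl (Prod.ext rfl (Prod.ext ?_ ?_)) <;> simp <;> ring
    · exact pvCard_foldl_offset N cs _ _ a b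

theorem loopA_eq_consume (N : Int) (cards : List Int) :
    ∀ (is : List Int) (hand left : PySem.Set Int) (matched half lm coin round : Int),
    pvLoopA N cards is (hand, left, matched, half, lm, coin, round) =
      pvConsume (pvDiscover N cards is (hand, left)) matched half lm coin round
  | [], hand, left, matched, half, lm, coin, round => by
    simp [pvLoopA, pvDiscover, pvConsume]
  | i :: is, hand, left, matched, half, lm, coin, round => by
    rw [pvLoopA, pvDiscover]
    rw [pvCard_foldl_offset N _ hand left half lm]
    rcases hfold : (PySem.List.slice cards (some i) (some (i + 2))).foldl (pvCard N)
        (hand, left, 0, 0) with ⟨hand', left', dh, dl⟩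
    simp only [pvConsume]
    split_ifs <;>
      first
        | rfl
        | rw [loopA_eq_consume N cards is]

theorem solution_spec : Claim_equal_solution := by
  intro coin cards _
  unfold Spec_solution solution solution_alt
  rcases (PySem.List.slice cards none (some (PySem.Int.floordiv (cards.length : Int) 3))).foldl
      (pvDraw (cards.length : Int)) (PySem.Set.empty, 0) with ⟨hand, matched⟩
  exact loopA_eq_consume _ _ _ _ _ _ _ _ _ _
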